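-- pv_equiv track=rewrite | github.com/binnama/Boot.dev | LearnPython/Loop/Meditate/main.py | meditate
-- ===== SOURCE A (Python) =====
-- def meditate(mana, max_mana, energy, energy_potions):
--
--     while mana <= max_mana:
--         if mana == max_mana:
--             return mana, energy, energy_potions
--
--         if energy == 0:
--             if energy_potions > 0:
--                 energy += 50
--                 energy_potions -= 1
--             else:
--                 return mana, energy, energy_potions
--
--
--         while energy > 0:
--             if mana == max_mana:
--                 return mana, energy, energy_potions
--             elif mana == max_mana - 1:
--                 energy -= 1
--                 mana += 1
--             elif mana == max_mana - 2:
--                 energy -= 1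
--                 mana += 2
--             else:
--                 energy -= 1
--                 mana += 3
--
--
--     return mana, energy, energy_potions
-- ===== SOURCE B (Python) =====
-- def meditate(mana, max_mana, energy, energy_potions):
--     gap = max_mana - mana
--     if gap <= 0:
--         return mana, energy, energy_potions
--     steps = -(-gap // 3)
--     if energy >= steps:
--         return max_mana, energy - steps, energy_potions
--     rem = steps - energy
--     k = -(-rem // 50)
--     if energy_potions >= k:
--         return max_mana, 50 * k - rem, energy_potions - k
--     pots = max(energy_potions, 0)
--     total = energy + 50 * pots
--     return mana + 3 * total, 0, energy_potions - pots
-- ===== Notes on version B (the rewrite author's own statement) =====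
-- stated objective: faster
-- what changed: Replaces the step-by-step mana/energy simulation loops with closed-form arithmetic: steps = ceil(gap/3), potions needed = ceil(remaining/50), leftovers computed directly.
import Mathlib
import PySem

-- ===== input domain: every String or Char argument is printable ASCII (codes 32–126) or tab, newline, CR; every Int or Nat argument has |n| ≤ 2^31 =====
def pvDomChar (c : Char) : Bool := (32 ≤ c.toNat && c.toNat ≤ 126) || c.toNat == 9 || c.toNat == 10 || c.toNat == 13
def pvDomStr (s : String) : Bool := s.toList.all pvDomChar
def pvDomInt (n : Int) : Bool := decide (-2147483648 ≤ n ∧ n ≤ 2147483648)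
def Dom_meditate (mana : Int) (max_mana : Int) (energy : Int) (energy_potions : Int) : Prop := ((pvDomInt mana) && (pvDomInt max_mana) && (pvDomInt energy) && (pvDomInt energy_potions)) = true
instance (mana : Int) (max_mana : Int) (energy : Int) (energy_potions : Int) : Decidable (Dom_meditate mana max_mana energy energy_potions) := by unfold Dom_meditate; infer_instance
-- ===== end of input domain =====

-- B replaces A's step-by-step simulation loops with O(1) closed-form arithmetic (asymptotically faster).

-- ===== PORT A =====
-- inner 'while energy > 0' loop of A; the Bool flag records whether the loop body
-- executed a 'return' (mana == max_mana branch) rather than falling out with energy ≤ 0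
def meditateInner (max_mana : Int) (mana : Int) (energy : Int) : Int × Int × Bool :=
  if energy > 0 then
    if mana = max_mana then (mana, energy, true)
    else if mana = max_mana - 1 then meditateInner max_mana (mana + 1) (energy - 1)
    else if mana = max_mana - 2 then meditateInner max_mana (mana + 2) (energy - 1)
    else meditateInner max_mana (mana + 3) (energy - 1)
  else (mana, energy, false)
termination_by energy.toNat
decreasing_by all_goals omega

-- outer 'while mana <= max_mana' loop of A; fuel only bounds the number of outer
-- iterations (A diverges when energy < 0 and mana < max_mana; those inputs are outside Pre_)
def meditateLoop (max_mana : Int) (fuel : Nat) (mana : Int) (energy : Int)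
    (energy_potions : Int) : Int × Int × Int :=
  match fuel with
  | 0 => (mana, energy, energy_potions)
  | fuel + 1 =>
    if mana ≤ max_mana then
      if mana = max_mana then (mana, energy, energy_potions)
      else if energy = 0 then
        if energy_potions > 0 then
          let r := meditateInner max_mana mana (energy + 50)
          if r.2.2 then (r.1, r.2.1, energy_potions - 1)
          else meditateLoop max_mana fuel r.1 r.2.1 (energy_potions - 1)
        else (mana, energy, energy_potions)
      else
        let r := meditateInner max_mana mana energy
        if r.2.2 then (r.1, r.2.1, energy_potions)
        else meditateLoop max_mana fuel r.1 r.2.1 energy_potions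
    else (mana, energy, energy_potions)

def meditate (mana : Int) (max_mana : Int) (energy : Int) (energy_potions : Int) : Int × Int × Int :=
  meditateLoop max_mana ((max_mana - mana).toNat + 1) mana energy energy_potions

-- ===== PORT B =====
def meditate_alt (mana : Int) (max_mana : Int) (energy : Int) (energy_potions : Int) : Int × Int × Int :=
  let gap := max_mana - mana
  if gap ≤ 0 then (mana, energy, energy_potions)
  else
    let steps := -(PySem.Int.floordiv (-gap) 3)
    if energy ≥ steps then (max_mana, energy - steps, energy_potions)
    else
      let rem := steps - energy
      let k := -(PySem.Int.floordiv (-rem) 50)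
      if energy_potions ≥ k then (max_mana, 50 * k - rem, energy_potions - k)
      else
        let pots := max energy_potions 0
        let total := energy + 50 * pots
        (mana + 3 * total, 0, energy_potions - pots)

-- ===== PRECONDITION & SPEC =====
-- Pre_ excludes exactly the inputs (energy < 0 while mana < max_mana) on which A's
-- outer loop makes no progress and the Python diverges (returns nothing).
def Pre_meditate (mana : Int) (max_mana : Int) (energy : Int) (energy_potions : Int) : Prop :=
  mana < max_mana → 0 ≤ energy
instance (mana : Int) (max_mana : Int) (energy : Int) (energy_potions : Int) : Decidable (Pre_meditate mana max_mana energy energy_potions) := by unfold Pre_meditate; infer_instance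

def pvWitness_meditate : Int × Int × Int × Int := (10, 100, 7, 2)

def Spec_meditate (mana : Int) (max_mana : Int) (energy : Int) (energy_potions : Int) (out : Int × Int × Int) : Prop := out = meditate_alt mana max_mana energy energy_potions
instance (mana : Int) (max_mana : Int) (energy : Int) (energy_potions : Int) (out : Int × Int × Int) : Decidable (Spec_meditate mana max_mana energy energy_potions out) := by unfold Spec_meditate; infer_instance

-- ===== CLAIM (what is proved, stated in full; the proofs are below) =====
def Claim_equal_meditate : Prop := ∀ (mana : Int) (max_mana : Int) (energy : Int) (energy_potions : Int), Dom_meditate mana max_mana energy energy_potions → Pre_meditate mana max_mana energy energy_potions → Spec_meditate mana max_mana energy energy_potions (meditate mana max_mana energy energy_potions)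

-- ===== LEMMAS AND PROOFS =====

theorem inner_at_max (max_mana : Int) (e : Int) :
    meditateInner max_mana max_mana e = if e > 0 then (max_mana, e, true) else (max_mana, e, false) := by
  rw [meditateInner]
  split_ifs with h1 h2 <;> first | rfl | exact absurd rfl h2

theorem inner_spec (max_mana : Int) : ∀ (n : Nat) (mana : Int), mana < max_mana →
    meditateInner max_mana mana (n : Int) =
      if 3 * (n : Int) ≥ max_mana - mana then
        (max_mana, (n : Int) - (max_mana - mana + 2) / 3,
          decide (0 < (n : Int) - (max_mana - mana + 2) / 3))
      else (mana + 3 * (n : Int), 0, false) := by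
  intro n
  induction n with
  | zero =>
    intro mana h
    rw [meditateInner]
    have h0 : ¬ ((0 : Nat) : Int) > 0 := by simp
    have h1 : ¬ (3 * ((0 : Nat) : Int) ≥ max_mana - mana) := by push_cast; omega
    rw [if_neg h0, if_neg h1]
    push_cast
    norm_num
  | succ n ih =>
    intro mana h
    rw [meditateInner]
    have hpos : ((n + 1 : Nat) : Int) > 0 := by push_cast; omega
    have hne : ¬ (mana = max_mana) := by omega
    have hsub : ((n + 1 : Nat) : Int) - 1 = (n : Int) := by push_cast; ring
    rw [if_pos hpos, if_neg hne, hsub]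
    by_cases h1 : mana = max_mana - 1
    · subst h1
      rw [if_pos rfl]
      have : max_mana - 1 + 1 = max_mana := by ring
      rw [this, inner_at_max]
      have hq : (max_mana - (max_mana - 1) + 2) / 3 = 1 := by omega
      have hge : 3 * ((n + 1 : Nat) : Int) ≥ max_mana - (max_mana - 1) := by push_cast; omega
      rw [if_pos hge, hq]
      by_cases hn : (n : Int) > 0
      · rw [if_pos hn]
        simp only [Prod.mk.injEq]
        refine ⟨trivial, by push_cast; ring, ?_⟩
        rw [eq_comm, decide_eq_true_eq]
        push_cast; omega
      · rw [if_neg hn]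
        simp only [Prod.mk.injEq]
        refine ⟨trivial, by push_cast; omega, ?_⟩
        rw [eq_comm, decide_eq_false_iff_not]
        push_cast; omega
    · rw [if_neg h1]
      by_cases h2 : mana = max_mana - 2
      · subst h2
        rw [if_pos rfl]
        have : max_mana - 2 + 2 = max_mana := by ring
        rw [this, inner_at_max]
        have hq : (max_mana - (max_mana - 2) + 2) / 3 = 1 := by omega
        have hge : 3 * ((n + 1 : Nat) : Int) ≥ max_mana - (max_mana - 2) := by push_cast; omega
        rw [if_pos hge, hq]
        by_cases hn : (n : Int) > 0
        · rw [if_pos hn]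
          simp only [Prod.mk.injEq]
          refine ⟨trivial, by push_cast; ring, ?_⟩
          rw [eq_comm, decide_eq_true_eq]
          push_cast; omega
        · rw [if_neg hn]
          simp only [Prod.mk.injEq]
          refine ⟨trivial, by push_cast; omega, ?_⟩
          rw [eq_comm, decide_eq_false_iff_not]
          push_cast; omega
      · rw [if_neg h2]
        have hgap3 : mana + 3 ≤ max_mana := by omega
        by_cases h3 : mana + 3 = max_mana
        · rw [h3, inner_at_max]
          have hq : (max_mana - mana + 2) / 3 = 1 := by omega
          have hge : 3 * ((n + 1 : Nat) : Int) ≥ max_mana - mana := by push_cast; omega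
          rw [if_pos hge, hq]
          by_cases hn : (n : Int) > 0
          · rw [if_pos hn]
            simp only [Prod.mk.injEq]
            refine ⟨trivial, by push_cast; ring, ?_⟩
            rw [eq_comm, decide_eq_true_eq]
            push_cast; omega
          · rw [if_neg hn]
            simp only [Prod.mk.injEq]
            refine ⟨trivial, by push_cast; omega, ?_⟩
            rw [eq_comm, decide_eq_false_iff_not]
            push_cast; omega
        · have hlt : mana + 3 < max_mana := by omega
          rw [ih (mana + 3) hlt]
          by_cases hge : 3 * ((n + 1 : Nat) : Int) ≥ max_mana - mana
          · have hge' : 3 * (n : Int) ≥ max_mana - (mana + 3) := by push_cast at hge ⊢; omega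
            rw [if_pos hge', if_pos hge]
            have hq : (max_mana - (mana + 3) + 2) / 3 = (max_mana - mana + 2) / 3 - 1 := by omega
            simp only [Prod.mk.injEq]
            refine ⟨trivial, by rw [hq]; push_cast; ring, ?_⟩
            rw [hq]
            have harg : (n : Int) - ((max_mana - mana + 2) / 3 - 1)
                = ((n + 1 : Nat) : Int) - (max_mana - mana + 2) / 3 := by push_cast; ring
            rw [harg]
          · have hge' : ¬ (3 * (n : Int) ≥ max_mana - (mana + 3)) := by push_cast at hge ⊢; omega
            rw [if_neg hge', if_neg hge]
            simp only [Prod.mk.injEq]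
            push_cast
            refine ⟨by ring, trivial⟩

theorem alt_done (mana max_mana energy potions : Int) (h : max_mana ≤ mana) :
    meditate_alt mana max_mana energy potions = (mana, energy, potions) := by
  simp only [meditate_alt]
  rw [if_pos (by omega)]

theorem alt_reach (mana max_mana energy potions : Int) (h : mana < max_mana)
    (hs : 3 * energy ≥ max_mana - mana) :
    meditate_alt mana max_mana energy potions
      = (max_mana, energy - (max_mana - mana + 2) / 3, potions) := by
  simp only [meditate_alt, PySem.Int.floordiv_eq_ediv_of_pos (by norm_num : (0:Int) < 3),
    PySem.Int.floordiv_eq_ediv_of_pos (by norm_num : (0:Int) < 50)]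
  split_ifs <;> simp only [Prod.mk.injEq, true_and, and_true] <;> omega

theorem alt_stuck (mana max_mana potions : Int) (h : mana < max_mana) (hp : potions ≤ 0) :
    meditate_alt mana max_mana 0 potions = (mana, 0, potions) := by
  simp only [meditate_alt, PySem.Int.floordiv_eq_ediv_of_pos (by norm_num : (0:Int) < 3),
    PySem.Int.floordiv_eq_ediv_of_pos (by norm_num : (0:Int) < 50)]
  rw [max_eq_right hp]
  split_ifs <;> simp only [Prod.mk.injEq, true_and, and_true] <;> omega

theorem alt_potion (mana max_mana potions : Int) (h : mana < max_mana) (hp : 0 < potions) :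
    meditate_alt mana max_mana 0 potions = meditate_alt mana max_mana 50 (potions - 1) := by
  simp only [meditate_alt, PySem.Int.floordiv_eq_ediv_of_pos (by norm_num : (0:Int) < 3),
    PySem.Int.floordiv_eq_ediv_of_pos (by norm_num : (0:Int) < 50)]
  rw [max_eq_left (by omega : (0:Int) ≤ potions), max_eq_left (by omega : (0:Int) ≤ potions - 1)]
  split_ifs <;> simp only [Prod.mk.injEq, true_and, and_true] <;> omega

theorem alt_drain (mana max_mana energy potions : Int) (h : mana < max_mana) (he : 0 ≤ energy)
    (hs : 3 * energy < max_mana - mana) :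
    meditate_alt mana max_mana energy potions
      = meditate_alt (mana + 3 * energy) max_mana 0 potions := by
  simp only [meditate_alt, PySem.Int.floordiv_eq_ediv_of_pos (by norm_num : (0:Int) < 3),
    PySem.Int.floordiv_eq_ediv_of_pos (by norm_num : (0:Int) < 50)]
  split_ifs <;> simp only [Prod.mk.injEq, true_and, and_true] <;> omega

theorem loop_spec (max_mana : Int) : ∀ (fuel : Nat) (mana energy energy_potions : Int),
    mana ≤ max_mana → 0 ≤ energy → (max_mana - mana).toNat < fuel →
    meditateLoop max_mana fuel mana energy energy_potions =
      meditate_alt mana max_mana energy energy_potions := by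
  intro fuel
  induction fuel with
  | zero => intro mana energy potions _ _ hf; omega
  | succ fuel ih =>
    intro mana energy potions hle he hf
    simp only [meditateLoop]
    rw [if_pos hle]
    by_cases hmax : mana = max_mana
    · rw [if_pos hmax, hmax, alt_done max_mana max_mana energy potions le_rfl]
    · rw [if_neg hmax]
      have hlt : mana < max_mana := by omega
      by_cases he0 : energy = 0
      · rw [if_pos he0]
        by_cases hp : potions > 0
        · rw [if_pos hp]
          have h50 : energy + 50 = ((50 : Nat) : Int) := by omega
          rw [h50, inner_spec max_mana 50 mana hlt, he0, alt_potion mana max_mana potions hlt hp]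
          by_cases hg : 3 * ((50 : Nat) : Int) ≥ max_mana - mana
          · rw [if_pos hg]
            rw [alt_reach mana max_mana 50 (potions - 1) hlt (by push_cast at hg ⊢; omega)]
            by_cases hl : 0 < ((50 : Nat) : Int) - (max_mana - mana + 2) / 3
            · rw [decide_eq_true hl, if_pos rfl]
              simp only [Prod.mk.injEq]
              refine ⟨trivial, by push_cast; ring, trivial⟩
            · rw [decide_eq_false hl, if_neg Bool.false_ne_true]
              rw [ih max_mana (((50 : Nat) : Int) - (max_mana - mana + 2) / 3) (potions - 1)
                    le_rfl (by push_cast at hl ⊢; omega) (by omega),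
                  alt_done max_mana max_mana _ _ le_rfl]
              simp only [Prod.mk.injEq]
              refine ⟨trivial, by push_cast; ring, trivial⟩
          · rw [if_neg hg, if_neg Bool.false_ne_true]
            rw [ih (mana + 3 * ((50 : Nat) : Int)) 0 (potions - 1) (by push_cast at hg ⊢; omega)
                  le_rfl (by push_cast at hg ⊢; omega)]
            rw [alt_drain mana max_mana 50 (potions - 1) hlt (by norm_num)
                  (by push_cast at hg; omega)]
            norm_num
        · rw [if_neg hp, he0, alt_stuck mana max_mana potions hlt (by omega)]
      · rw [if_neg he0]
        have he1 : (1 : Int) ≤ energy := by omega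
        have hcast : (energy.toNat : Int) = energy := Int.toNat_of_nonneg he
        rw [← hcast, inner_spec max_mana energy.toNat mana hlt]
        by_cases hg : 3 * (energy.toNat : Int) ≥ max_mana - mana
        · rw [if_pos hg]
          rw [alt_reach mana max_mana (energy.toNat : Int) potions hlt hg]
          by_cases hl : 0 < (energy.toNat : Int) - (max_mana - mana + 2) / 3
          · rw [decide_eq_true hl, if_pos rfl]
          · rw [decide_eq_false hl, if_neg Bool.false_ne_true]
            rw [ih max_mana ((energy.toNat : Int) - (max_mana - mana + 2) / 3) potions
                  le_rfl (by omega) (by omega),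
                alt_done max_mana max_mana _ _ le_rfl]
        · rw [if_neg hg, if_neg Bool.false_ne_true]
          rw [ih (mana + 3 * (energy.toNat : Int)) 0 potions (by omega) le_rfl (by omega)]
          rw [alt_drain mana max_mana (energy.toNat : Int) potions hlt (by omega) (by omega)]

-- ===== VERDICT (by name: the statement is the Claim_ definition above) =====
theorem meditate_spec : Claim_equal_meditate := by
  intro mana max_mana energy energy_potions _hdom hpre
  unfold Spec_meditate meditate
  by_cases hlt : mana < max_mana
  · exact loop_spec max_mana _ mana energy energy_potions (le_of_lt hlt) (hpre hlt) (by omega)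
  · -- mana ≥ max_mana: both sides return the input unchanged
    by_cases heq : mana = max_mana
    · subst heq
      simp [meditateLoop, meditate_alt]
    · have : ¬ mana ≤ max_mana := by omega
      simp [meditateLoop, meditate_alt, this, show max_mana - mana ≤ 0 by omega]
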